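-- pv_equiv track=rewrite | github.com/mahyar-osn/scaffold-pathway-maker | src/pathmaker/path_scaffold.py | generate_path_scaffold
-- ===== SOURCE A (Python) =====
-- def generate_path_scaffold(centreline_marker_names, edge_list):
--     """
--     Find match points between centreline and edges list and if the element is valid store the nodes and elements lists.
--     :param centreline_marker_names: list of marker names in the centreline.
--     :param edge_list: list of edges in the path.
--     :return: list of nodes and valid elements of the scaffold.
--     """
--
--     def find_term_level():
--         level = -1
--         for c in node_term.split():
--             if c.lower() in edge[nid].lower():
--                 # find level it is found. \n separates the levels. The term with minimum level is what we want.
--                 for i, t in enumerate(edge[nid].lower().split('\n')):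
--                     if c.lower() in t:
--                         level = i
--             else:
--                 level = -1
--                 break
--         return level
--
--     def find_inner_term():
--         level_min = 100
--         for t in terms:
--             if t[1] < level_min:
--                 inner_term = t[0]
--
--         return inner_term
--
--     terms = []
--     path_elements = []
--     for edge in edge_list:
--         node_names = [None, None]
--         for nid in range(2):
--             heart = 'heart' in edge[nid].lower()
--             found_whole_term = False
--             for node_term in centreline_marker_names:
--                 lvl = find_term_level()
--                 if lvl != -1:
--                     found_whole_term = True
--                     terms.append([node_term, lvl])
--
--             if found_whole_term:
--                 node_term_t = find_inner_term()
--                 node_names[nid] = node_term_t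
--             # if the term is heart use fibrous pericardium coordinates.
--             elif heart:
--                 node_names[nid] = 'fibrous pericardium'
--         # Ignore the element if its nodes are the same.
--         if node_names[0] != node_names[1]:
--             if node_names[0] and node_names[1]:
--                 path_elements.append(node_names)
--
--     path_nodes = set()
--     for c in path_elements:
--         path_nodes.add(c[0])
--         path_nodes.add(c[1])
--     path_nodes = list(sorted(path_nodes))
--
--     return path_nodes, path_elements
-- ===== SOURCE B (Python) =====
-- def generate_path_scaffold(centreline_marker_names, edge_list):
--     """Match centreline markers to edge nodes and build the scaffold's node/element lists.
--
--     Single-pass reformulation: instead of accumulating a growing ``terms``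
--     list and rescanning it (``find_inner_term``) with per-word line-level
--     bookkeeping, keep one persistent ``last_term`` variable: a marker matches
--     a node text iff every whitespace-separated word of the marker occurs in
--     the lowercased text, and the node is named by the most recent match.
--     """
--
--     def matches(term, text_lower):
--         words = term.split()
--         return bool(words) and all(w.lower() in text_lower for w in words)
--
--     last_term = None
--     path_elements = []
--     for edge in edge_list:
--         pair = []
--         for text in edge[:2]:
--             text_lower = text.lower()
--             hit = False
--             for m in centreline_marker_names:
--                 if matches(m, text_lower):
--                     hit = True
--                     last_term = m
--             if hit:
--                 name = last_term
--             elif 'heart' in text_lower: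
--                 name = 'fibrous pericardium'
--             else:
--                 name = None
--             pair.append(name)
--         if pair[0] != pair[1] and pair[0] is not None and pair[1] is not None:
--             path_elements.append(pair)
--
--     path_nodes = sorted({c for e in path_elements for c in e})
--     return path_nodes, path_elements
-- ===== Notes on version B (the rewrite author's own statement) =====
-- stated objective: simpler
-- what changed: B drops A's growing terms list (rescanned by find_inner_term on every matched node, so A degrades quadratically as matches accumulate) and all per-word line-level bookkeeping, keeping only a single persistent last_term variable updated on each whole-word match (a marker matches iff all its words occur in the lowercased node text).
import Mathlib
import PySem

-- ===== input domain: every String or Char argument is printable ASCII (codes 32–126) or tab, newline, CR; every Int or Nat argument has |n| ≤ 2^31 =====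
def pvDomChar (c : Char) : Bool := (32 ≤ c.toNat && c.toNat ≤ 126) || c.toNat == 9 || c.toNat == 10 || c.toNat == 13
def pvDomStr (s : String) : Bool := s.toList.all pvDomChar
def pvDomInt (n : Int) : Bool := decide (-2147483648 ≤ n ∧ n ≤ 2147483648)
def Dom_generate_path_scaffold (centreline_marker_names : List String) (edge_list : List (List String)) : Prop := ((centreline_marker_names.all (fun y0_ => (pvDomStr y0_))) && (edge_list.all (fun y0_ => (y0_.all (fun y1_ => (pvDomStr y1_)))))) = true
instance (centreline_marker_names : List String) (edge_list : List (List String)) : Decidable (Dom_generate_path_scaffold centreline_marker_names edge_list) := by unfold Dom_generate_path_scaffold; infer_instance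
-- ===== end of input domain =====

-- B replaces A's growing `terms` list, its `find_inner_term` rescan and the per-word
-- line-level bookkeeping by one persistent `last_term` variable (objective: simpler).

-- ===== PORT A =====
-- the lines edge[nid].lower().split('\n')  (split? is some: the separator "\n" is nonempty)
def pvLinesA (text : String) : List String :=
  (PySem.Str.split? (PySem.Str.lower text) "\n").getD []

-- the inner 'for i, t in enumerate(...): if c.lower() in t: level = i' loop
def pvWordLevelA (text : String) (c : String) (level : Int) : Int :=
  (PySem.List.enumerate (pvLinesA text)).foldl
    (fun lv p => if PySem.Str.isIn (PySem.Str.lower c) p.2 then p.1 else lv) level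

-- find_term_level: loop over node_term.split() with the 'break' as early return of -1
def pvFindTermLevelA (text : String) : List String → Int → Int
  | [], level => level
  | c :: rest, level =>
    if PySem.Str.isIn (PySem.Str.lower c) (PySem.Str.lower text) then
      pvFindTermLevelA text rest (pvWordLevelA text c level)
    else (-1)

-- find_inner_term: 'inner_term' as an Option (none = the variable was never assigned;
-- Python raises UnboundLocalError there, excluded by Pre_)
def pvFindInnerTermA (terms : List (String × Int)) : Option String :=
  terms.foldl (fun acc t => if t.2 < 100 then some t.1 else acc) none

-- Python truthiness of a str-or-None value ('if node_names[0] and node_names[1]')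
def pvTruthyA (o : Option String) : Bool :=
  match o with
  | none => false
  | some s => !(s.toList.isEmpty)

-- the body of 'for nid in range(2)' for one node text: returns (terms', node_names[nid])
def pvNodeA (cm : List String) (terms : List (String × Int)) (text : String) :
    List (String × Int) × Option String :=
  let heart := PySem.Str.isIn "heart" (PySem.Str.lower text)
  let r := cm.foldl (fun (st : Bool × List (String × Int)) node_term =>
      let lvl := pvFindTermLevelA text (PySem.Str.split₀ node_term) (-1)
      if lvl ≠ -1 then (true, st.2 ++ [(node_term, lvl)]) else st)
    (false, terms)
  (r.2, if r.1 then pvFindInnerTermA r.2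
        else if heart then some "fibrous pericardium" else none)

-- the body of 'for edge in edge_list': state = (terms, path_elements)
def pvEdgeA (cm : List String) (st : List (String × Int) × List (List String))
    (edge : List String) : List (String × Int) × List (List String) :=
  let q := (PySem.List.pyRange 0 2 1).foldl
      (fun (q : List (String × Int) × List (Option String)) nid =>
        let r := pvNodeA cm q.1 (PySem.List.pyGetD edge nid "")
        (r.1, PySem.List.pySetD q.2 nid r.2))
      (st.1, [none, none])
  let n0 := PySem.List.pyGetD q.2 0 none
  let n1 := PySem.List.pyGetD q.2 1 none
  (q.1, if n0 ≠ n1 then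
          if pvTruthyA n0 && pvTruthyA n1 then st.2 ++ [[n0.getD "", n1.getD ""]]
          else st.2
        else st.2)

def generate_path_scaffold (centreline_marker_names : List String) (edge_list : List (List String)) : List String × List (List String) :=
  let st := edge_list.foldl (pvEdgeA centreline_marker_names) ([], [])
  let path_nodes := st.2.foldl (fun s c =>
      PySem.Set.add (PySem.Set.add s (PySem.List.pyGetD c 0 "")) (PySem.List.pyGetD c 1 ""))
    PySem.Set.empty
  (PySem.List.sorted path_nodes (fun x => x) false, st.2)

-- ===== PORT B =====
-- matches(term, text_lower): every whitespace-separated word of term occurs in text_lower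
def pvMatchesB (m text_lower : String) : Bool :=
  let ws := PySem.Str.split₀ m
  !ws.isEmpty && ws.all (fun w => PySem.Str.isIn (PySem.Str.lower w) text_lower)

-- one node text: returns (new last_term, name)
def pvNodeB (cm : List String) (last : Option String) (text : String) :
    Option String × Option String :=
  let tl := PySem.Str.lower text
  let f := cm.foldl (fun (p : Bool × Option String) m =>
      if pvMatchesB m tl then (true, some m) else p) (false, last)
  (f.2, if f.1 then f.2
        else if PySem.Str.isIn "heart" tl then some "fibrous pericardium" else none)

-- one edge: state = (last_term, path_elements); 'for text in edge[:2]' builds pair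
def pvEdgeB (cm : List String) (st : Option String × List (List String))
    (edge : List String) : Option String × List (List String) :=
  let q := (PySem.List.slice edge none (some 2)).foldl
      (fun (q : Option String × List (Option String)) text =>
        let r := pvNodeB cm q.1 text
        (r.1, q.2 ++ [r.2]))
      (st.1, [])
  let n0 := PySem.List.pyGetD q.2 0 none
  let n1 := PySem.List.pyGetD q.2 1 none
  (q.1, if n0 ≠ n1 ∧ n0 ≠ none ∧ n1 ≠ none then st.2 ++ [[n0.getD "", n1.getD ""]]
        else st.2)

def generate_path_scaffold_alt (centreline_marker_names : List String) (edge_list : List (List String)) : List String × List (List String) :=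
  let st := edge_list.foldl (pvEdgeB centreline_marker_names) (none, [])
  (PySem.List.sorted (PySem.Set.ofList (st.2.flatMap (fun e => e))) (fun x => x) false, st.2)

-- ===== PRECONDITION & SPEC =====
-- Pre_ excludes (a) edges with fewer than two node strings, where A raises IndexError, and
-- (b) inputs where a used node string has 100 or more newline-separated lines: there A's
-- '< 100' level threshold can make find_inner_term raise UnboundLocalError or silently skip
-- a matched marker (an artefact of its hard-coded constant) — a narrowing of the domain of
-- inputs A returns on, limited to strings with ≥ 100 lines.
def Pre_generate_path_scaffold (centreline_marker_names : List String) (edge_list : List (List String)) : Prop :=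
  ∀ edge ∈ edge_list, 2 ≤ edge.length ∧
    ∀ t ∈ edge.take 2, ((PySem.Str.split? (PySem.Str.lower t) "\n").getD []).length ≤ 100
instance (centreline_marker_names : List String) (edge_list : List (List String)) : Decidable (Pre_generate_path_scaffold centreline_marker_names edge_list) := by unfold Pre_generate_path_scaffold; infer_instance

def pvWitness_generate_path_scaffold : List String × List (List String) :=
  (["apex", "left ventricle"], [["apex of heart", "left ventricle wall"], ["heart", "nothing"]])

def Spec_generate_path_scaffold (centreline_marker_names : List String) (edge_list : List (List String)) (out : List String × List (List String)) : Prop := out = generate_path_scaffold_alt centreline_marker_names edge_list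
instance (centreline_marker_names : List String) (edge_list : List (List String)) (out : List String × List (List String)) : Decidable (Spec_generate_path_scaffold centreline_marker_names edge_list out) := by unfold Spec_generate_path_scaffold; infer_instance

-- ===== CLAIM (what is proved, stated in full; the proofs are below) =====
def Claim_equal_generate_path_scaffold : Prop := ∀ (centreline_marker_names : List String) (edge_list : List (List String)), Dom_generate_path_scaffold centreline_marker_names edge_list → Pre_generate_path_scaffold centreline_marker_names edge_list → Spec_generate_path_scaffold centreline_marker_names edge_list (generate_path_scaffold centreline_marker_names edge_list)

-- ===== LEMMAS AND PROOFS =====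

def pvSplitNL : List Char → List (List Char)
  | [] => [[]]
  | c :: rest => if c = '\n' then [] :: pvSplitNL rest
                 else (c :: (pvSplitNL rest).headI) :: (pvSplitNL rest).tail

theorem pvSplitNL_ne_nil (l : List Char) : pvSplitNL l ≠ [] := by
  cases l with
  | nil => simp [pvSplitNL]
  | cons c rest => by_cases h : c = '\n' <;> simp [pvSplitNL, h]

theorem pvSplitOn_go_eq (fuel : Nat) : ∀ (l cur : List Char) (acc : List (List Char)),
    l.length ≤ fuel →
    PySem.Chars.splitOn.go ['\n'] fuel l cur acc =
      acc.reverse ++ (cur.reverse ++ (pvSplitNL l).headI) :: (pvSplitNL l).tail := by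
  induction fuel with
  | zero =>
    intro l cur acc h
    have : l = [] := by cases l <;> simp_all
    subst this
    simp [PySem.Chars.splitOn.go, pvSplitNL]
  | succ n ih =>
    intro l cur acc h
    cases l with
    | nil => simp [PySem.Chars.splitOn.go, pvSplitNL]
    | cons c rest =>
      by_cases hc : c = '\n'
      · subst hc
        have hpre : List.isPrefixOf ['\n'] ('\n' :: rest) = true := by
          simp [List.isPrefixOf]
        rw [PySem.Chars.splitOn.go]
        simp only [hpre, if_true]
        simp only [List.length_cons, List.drop_succ_cons, List.length_nil, List.drop_zero]
        rw [ih rest [] (cur.reverse :: acc) (by simp at h; omega)]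
        obtain ⟨hh, ht, he⟩ : ∃ hh ht, pvSplitNL rest = hh :: ht :=
          List.exists_cons_of_ne_nil (pvSplitNL_ne_nil rest)
        simp [pvSplitNL, he]
      · have hpre : List.isPrefixOf ['\n'] (c :: rest) = false := by
          simp [List.isPrefixOf, hc]
          intro h'; exact absurd h'.symm hc
        rw [PySem.Chars.splitOn.go]
        simp only [hpre]
        rw [ih rest (c :: cur) acc (by simp at h; omega)]
        obtain ⟨hh, ht, he⟩ : ∃ hh ht, pvSplitNL rest = hh :: ht :=
          List.exists_cons_of_ne_nil (pvSplitNL_ne_nil rest)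
        simp [pvSplitNL, hc, he]

theorem pvSplitOn_eq (cs : List Char) : PySem.Chars.splitOn cs ['\n'] = pvSplitNL cs := by
  rw [PySem.Chars.splitOn, pvSplitOn_go_eq (cs.length + 1) cs [] [] (by omega)]
  obtain ⟨hh, ht, he⟩ : ∃ hh ht, pvSplitNL cs = hh :: ht :=
    List.exists_cons_of_ne_nil (pvSplitNL_ne_nil cs)
  simp [he]

theorem pvSplitNL_head_prefix {w : List Char} :
    ∀ {cs : List Char}, '\n' ∉ w → w <+: cs → w <+: (pvSplitNL cs).headI := by
  induction w with
  | nil => intro cs _ _; exact List.nil_prefix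
  | cons a w' ih =>
    intro cs hnl hp
    obtain ⟨t, ht⟩ := hp
    subst ht
    have ha : a ≠ '\n' := fun h => hnl (h ▸ List.mem_cons_self)
    have hp' : w' <+: (w' ++ t) := List.prefix_append w' t
    have hnl' : '\n' ∉ w' := fun h => hnl (List.mem_cons_of_mem a h)
    have := ih hnl' hp'
    simp only [List.cons_append, pvSplitNL, if_neg ha, List.headI_cons]
    exact List.cons_prefix_cons.mpr ⟨rfl, this⟩

theorem pvSplitNL_infix {w : List Char} :
    ∀ {cs : List Char}, '\n' ∉ w → w <:+: cs → ∃ p ∈ pvSplitNL cs, w <:+: p := by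
  intro cs hnl
  induction cs with
  | nil =>
    intro h
    rw [List.infix_nil] at h
    subst h
    exact ⟨[], by simp [pvSplitNL]⟩
  | cons c rest ih =>
    intro h
    rcases List.infix_cons_iff.mp h with hpre | hinf
    · refine ⟨(pvSplitNL (c :: rest)).headI, ?_, (pvSplitNL_head_prefix hnl hpre).isInfix⟩
      obtain ⟨hh, ht, he⟩ : ∃ hh ht, pvSplitNL (c :: rest) = hh :: ht :=
        List.exists_cons_of_ne_nil (pvSplitNL_ne_nil _)
      rw [he]; simp
    · obtain ⟨p, hp, hwp⟩ := ih hinf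
      by_cases hc : c = '\n'
      · exact ⟨p, by simp [pvSplitNL, hc, hp], hwp⟩
      · obtain ⟨hh, ht, he⟩ : ∃ hh ht, pvSplitNL rest = hh :: ht :=
          List.exists_cons_of_ne_nil (pvSplitNL_ne_nil rest)
        rw [he] at hp
        rcases List.mem_cons.mp hp with rfl | hpt
        · refine ⟨c :: p, ?_, hwp.trans (List.suffix_cons c p).isInfix⟩
          simp [pvSplitNL, hc, he]
        · exact ⟨p, by simp [pvSplitNL, hc, he, hpt], hwp⟩

-- pieces of split₀ contain no whitespace characters
theorem pvSplit0_go_no_space :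
    ∀ (s cur : List Char) (acc : List (List Char)),
      (∀ c ∈ cur, PySem.Chars.isspace c = false) →
      (∀ p ∈ acc, ∀ c ∈ p, PySem.Chars.isspace c = false) →
      ∀ p ∈ PySem.Chars.split₀.go s cur acc, ∀ c ∈ p, PySem.Chars.isspace c = false := by
  intro s
  induction s with
  | nil =>
    intro cur acc hcur hacc p hp
    rw [PySem.Chars.split₀.go] at hp
    by_cases hc : cur.isEmpty
    · simp [hc] at hp
      exact hacc p hp
    · simp [hc] at hp
      rcases hp with hp | hp
      · exact hacc p hp
      · subst hp; intro c hc2; exact hcur c (by simpa using hc2)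
  | cons c rest ih =>
    intro cur acc hcur hacc p hp
    rw [PySem.Chars.split₀.go] at hp
    by_cases hs : PySem.Chars.isspace c
    · simp only [hs, if_true] at hp
      by_cases hc : cur.isEmpty
      · simp only [hc, if_true] at hp
        exact ih [] acc (by simp) hacc p hp
      · simp only [hc, if_false, Bool.false_eq_true] at hp
        refine ih [] (cur.reverse :: acc) (by simp) ?_ p hp
        intro p' hp' c' hc'
        rcases List.mem_cons.mp hp' with rfl | h
        · exact hcur c' (by simpa using hc')
        · exact hacc p' h c' hc'
    · simp only [hs, Bool.false_eq_true, if_false] at hp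
      refine ih (c :: cur) acc ?_ hacc p hp
      intro c' hc'
      rcases List.mem_cons.mp hc' with rfl | h
      · simpa using hs
      · exact hcur c' h

theorem pvSplit0_no_space (cs : List Char) :
    ∀ p ∈ PySem.Chars.split₀ cs, ∀ c ∈ p, PySem.Chars.isspace c = false := by
  intro p hp
  exact pvSplit0_go_no_space cs [] [] (by simp) (by simp) p (by simpa [PySem.Chars.split₀] using hp)

theorem pvLowerChar_ne_nl {c : Char} (h : c ≠ '\n') : PySem.Chars.lowerChar c ≠ '\n' := by
  unfold PySem.Chars.lowerChar
  by_cases hu : PySem.Chars.isupper c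
  · simp only [hu, if_true]
    unfold PySem.Chars.isupper at hu
    simp only [Bool.and_eq_true, decide_eq_true_eq] at hu
    intro he
    have h1 : ('A' : Char) ≤ c := hu.1
    have h2 : c ≤ 'Z' := hu.2
    have : (Char.ofNat (c.toNat + 32)).toNat = ('\n' : Char).toNat := by rw [he]
    have hr : 65 ≤ c.toNat ∧ c.toNat ≤ 90 := by
      exact ⟨h1, h2⟩
    rw [Char.toNat_ofNat] at this
    have hv : (c.toNat + 32).isValidChar := Or.inl (by omega)
    rw [if_pos hv] at this
    have : ('\n' : Char).toNat = 10 := by decide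
    omega
  · simpa [hu] using h


-- generic level-fold lemmas
theorem pvFold_cases {α : Type} (t : Int × α → Bool) :
    ∀ (L : List (Int × α)) (lvl : Int),
      L.foldl (fun lv p => if t p then p.1 else lv) lvl = lvl ∨
      ∃ p ∈ L, L.foldl (fun lv p => if t p then p.1 else lv) lvl = p.1 := by
  intro L
  induction L with
  | nil => intro lvl; exact Or.inl rfl
  | cons q rest ih =>
    intro lvl
    simp only [List.foldl_cons]
    rcases ih (if t q then q.1 else lvl) with h | ⟨p, hp, h⟩
    · by_cases hq : t q
      · refine Or.inr ⟨q, List.mem_cons_self, ?_⟩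
        rw [h, if_pos hq]
      · refine Or.inl ?_
        rw [h, if_neg hq]
    · exact Or.inr ⟨p, List.mem_cons_of_mem _ hp, h⟩

theorem pvFold_fire {α : Type} (t : Int × α → Bool) :
    ∀ (L : List (Int × α)) (lvl : Int), (∀ p ∈ L, 0 ≤ p.1) → (∃ p ∈ L, t p = true) →
      0 ≤ L.foldl (fun lv p => if t p then p.1 else lv) lvl := by
  intro L
  induction L with
  | nil => intro lvl _ h; simp at h
  | cons q rest ih =>
    intro lvl hpos hfire
    simp only [List.foldl_cons]
    by_cases hrest : ∃ p ∈ rest, t p = true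
    · exact ih _ (fun p hp => hpos p (List.mem_cons_of_mem _ hp)) hrest
    · have hq : t q = true := by
        rcases hfire with ⟨p, hp, hpt⟩
        rcases List.mem_cons.mp hp with rfl | h
        · exact hpt
        · exact absurd ⟨p, h, hpt⟩ hrest
      rcases pvFold_cases t rest (if t q then q.1 else lvl) with h | ⟨p, hp, h⟩
      · rw [h, if_pos hq]; exact hpos q List.mem_cons_self
      · rw [h]; exact hpos p (List.mem_cons_of_mem _ hp)

theorem pvFold_nonneg {α : Type} (t : Int × α → Bool) (L : List (Int × α)) (lvl : Int)
    (hpos : ∀ p ∈ L, 0 ≤ p.1) (h0 : 0 ≤ lvl) :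
    0 ≤ L.foldl (fun lv p => if t p then p.1 else lv) lvl := by
  rcases pvFold_cases t L lvl with h | ⟨p, hp, h⟩
  · rw [h]; exact h0
  · rw [h]; exact hpos p hp

theorem pvFold_lt {α : Type} (t : Int × α → Bool) (L : List (Int × α)) (lvl : Int)
    (hlt : ∀ p ∈ L, p.1 < 100) (h0 : lvl < 100) :
    L.foldl (fun lv p => if t p then p.1 else lv) lvl < 100 := by
  rcases pvFold_cases t L lvl with h | ⟨p, hp, h⟩
  · rw [h]; exact h0
  · rw [h]; exact hlt p hp

-- facts about enumerate of the lines list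
theorem pvEnum_fst_nonneg {α : Type} (L : List α) (p : Int × α)
    (hp : p ∈ PySem.List.enumerate L 0) : 0 ≤ p.1 := by
  rw [PySem.List.mem_enumerate_iff] at hp
  obtain ⟨k, hk, rfl⟩ := hp
  simp

theorem pvEnum_fst_lt {α : Type} (L : List α) (hL : L.length ≤ 100) (p : Int × α)
    (hp : p ∈ PySem.List.enumerate L 0) : p.1 < 100 := by
  rw [PySem.List.mem_enumerate_iff] at hp
  obtain ⟨k, hk, rfl⟩ := hp
  simp
  omega

-- the lines list is pvSplitNL of the lowered text
theorem pvLinesA_eq (text : String) :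
    pvLinesA text = (pvSplitNL (PySem.Str.lower text).toList).map String.ofList := by
  unfold pvLinesA
  rw [PySem.Str.split?]
  have : ("\n" : String).toList = ['\n'] := rfl
  rw [this]
  rw [PySem.Chars.split?]
  simp only [List.isEmpty_cons, Bool.false_eq_true, if_false, Option.map_some, Option.getD_some]
  rw [pvSplitOn_eq]

-- a word of split₀, lowered, contains no newline
theorem pvWord_no_nl {m w : String} (hw : w ∈ PySem.Str.split₀ m) :
    '\n' ∉ (PySem.Str.lower w).toList := by
  intro hmem
  rw [PySem.Str.toList_lower] at hmem
  unfold PySem.Chars.lower at hmem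
  obtain ⟨c, hc, he⟩ := List.mem_map.mp hmem
  have hcs : PySem.Chars.isspace c = false := by
    have hwl : w.toList ∈ PySem.Chars.split₀ m.toList := by
      rw [← PySem.Str.split₀_map_toList]
      exact List.mem_map_of_mem hw
    exact pvSplit0_no_space m.toList w.toList hwl c hc
  by_cases hcn : c = '\n'
  · subst hcn
    simp [PySem.Chars.isspace] at hcs
  · exact pvLowerChar_ne_nl hcn he

-- every member of a list appears in its enumeration
theorem pvMem_enum {α : Type} {L : List α} {x : α} (hx : x ∈ L) :
    ∃ q ∈ PySem.List.enumerate L 0, q.2 = x := by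
  obtain ⟨k, hk, rfl⟩ := List.getElem_of_mem hx
  exact ⟨((k : Int), L[k]), (PySem.List.mem_enumerate_iff L 0 _).mpr ⟨k, hk, by simp⟩, rfl⟩

-- a matched word fires the enumerate loop
theorem pvWord_fires {m w text : String} (hw : w ∈ PySem.Str.split₀ m)
    (hin : PySem.Str.isIn (PySem.Str.lower w) (PySem.Str.lower text) = true) :
    ∃ q ∈ PySem.List.enumerate (pvLinesA text) 0,
      PySem.Str.isIn (PySem.Str.lower w) q.2 = true := by
  have hnl : '\n' ∉ (PySem.Str.lower w).toList := pvWord_no_nl hw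
  rw [PySem.Str.isIn_eq, PySem.Chars.isIn_iff_infix] at hin
  obtain ⟨p, hp, hwp⟩ := pvSplitNL_infix hnl hin
  have hmem : String.ofList p ∈ pvLinesA text := by
    rw [pvLinesA_eq]; exact List.mem_map_of_mem hp
  obtain ⟨q, hq, hq2⟩ := pvMem_enum hmem
  refine ⟨q, hq, ?_⟩
  rw [hq2, PySem.Str.isIn_eq, String.toList_ofList, PySem.Chars.isIn_iff_infix]
  exact hwp

-- pvWordLevelA bounds
theorem pvWordLevelA_nonneg_of_fire {m w text : String} (hw : w ∈ PySem.Str.split₀ m)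
    (hin : PySem.Str.isIn (PySem.Str.lower w) (PySem.Str.lower text) = true) (lvl : Int) :
    0 ≤ pvWordLevelA text w lvl := by
  unfold pvWordLevelA
  exact pvFold_fire _ _ lvl (fun p hp => pvEnum_fst_nonneg _ p hp) (pvWord_fires hw hin)

theorem pvWordLevelA_nonneg {text w : String} {lvl : Int} (h0 : 0 ≤ lvl) :
    0 ≤ pvWordLevelA text w lvl := by
  unfold pvWordLevelA
  exact pvFold_nonneg _ _ lvl (fun p hp => pvEnum_fst_nonneg _ p hp) h0

theorem pvWordLevelA_lt {text w : String} {lvl : Int} (hL : (pvLinesA text).length ≤ 100)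
    (h0 : lvl < 100) : pvWordLevelA text w lvl < 100 := by
  unfold pvWordLevelA
  exact pvFold_lt _ _ lvl (fun p hp => pvEnum_fst_lt _ hL p hp) h0

-- find_term_level: the three behaviours
theorem pvFTL_bad {text : String} :
    ∀ {ws : List String} (lvl : Int), (∃ w ∈ ws, PySem.Str.isIn (PySem.Str.lower w) (PySem.Str.lower text) = false) →
      pvFindTermLevelA text ws lvl = -1 := by
  intro ws
  induction ws with
  | nil => intro lvl h; simp at h
  | cons w rest ih =>
    intro lvl h
    unfold pvFindTermLevelA
    by_cases hin : PySem.Str.isIn (PySem.Str.lower w) (PySem.Str.lower text) = true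
    · rw [if_pos hin]
      rcases h with ⟨w', hw', hbad⟩
      rcases List.mem_cons.mp hw' with rfl | hmem
      · rw [hin] at hbad; cases hbad
      · exact ih _ ⟨w', hmem, hbad⟩
    · rw [if_neg hin]

theorem pvFTL_keep {text : String} :
    ∀ {ws : List String} {lvl : Int},
      (∀ w ∈ ws, PySem.Str.isIn (PySem.Str.lower w) (PySem.Str.lower text) = true) →
      0 ≤ lvl → 0 ≤ pvFindTermLevelA text ws lvl := by
  intro ws
  induction ws with
  | nil => intro lvl _ h0; exact h0
  | cons w rest ih =>
    intro lvl hall h0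
    unfold pvFindTermLevelA
    rw [if_pos (hall w List.mem_cons_self)]
    exact ih (fun w' h => hall w' (List.mem_cons_of_mem _ h)) (pvWordLevelA_nonneg h0)

theorem pvFTL_good {m text : String} {ws : List String} (hws : ws = PySem.Str.split₀ m)
    (hne : ws ≠ [])
    (hall : ∀ w ∈ ws, PySem.Str.isIn (PySem.Str.lower w) (PySem.Str.lower text) = true) :
    0 ≤ pvFindTermLevelA text ws (-1) := by
  cases ws with
  | nil => exact absurd rfl hne
  | cons w rest =>
    unfold pvFindTermLevelA
    rw [if_pos (hall w List.mem_cons_self)]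
    refine pvFTL_keep (fun w' h => hall w' (List.mem_cons_of_mem _ h)) ?_
    refine pvWordLevelA_nonneg_of_fire (m := m) ?_ (hall w List.mem_cons_self) _
    rw [← hws]; exact List.mem_cons_self

theorem pvFTL_lt {text : String} (hL : (pvLinesA text).length ≤ 100) :
    ∀ (ws : List String) (lvl : Int), lvl < 100 →
      pvFindTermLevelA text ws lvl < 100 := by
  intro ws
  induction ws with
  | nil => intro lvl h; exact h
  | cons w rest ih =>
    intro lvl h
    unfold pvFindTermLevelA
    by_cases hin : PySem.Str.isIn (PySem.Str.lower w) (PySem.Str.lower text) = true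
    · rw [if_pos hin]
      exact ih _ (pvWordLevelA_lt hL h)
    · rw [if_neg hin]; omega

-- the characterization: A's find_term_level ≠ -1 iff B's matches
theorem pvFTL_iff (m text : String) :
    (pvFindTermLevelA text (PySem.Str.split₀ m) (-1) ≠ -1) ↔
      pvMatchesB m (PySem.Str.lower text) = true := by
  unfold pvMatchesB
  simp only [Bool.and_eq_true, Bool.not_eq_eq_eq_not, Bool.not_true, List.all_eq_true]
  constructor
  · intro hne
    by_cases hws : PySem.Str.split₀ m = []
    · rw [hws] at hne
      exact absurd (rfl : pvFindTermLevelA text [] (-1) = -1) hne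
    · refine ⟨by simpa [List.isEmpty_iff] using hws, ?_⟩
      intro w hw
      by_contra hbad
      exact hne (pvFTL_bad _ ⟨w, hw, by simpa using hbad⟩)
  · rintro ⟨hne, hall⟩
    have := pvFTL_good (m := m) rfl (by simpa [List.isEmpty_iff] using hne) hall
    omega

def pvOk (o : Option String) : Prop := ∀ s, o = some s → s.toList ≠ []

theorem pvInner_append (terms : List (String × Int)) (m : String) (l : Int) :
    pvFindInnerTermA (terms ++ [(m, l)]) =
      if l < 100 then some m else pvFindInnerTermA terms := by
  unfold pvFindInnerTermA
  rw [List.foldl_append]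
  rfl

theorem pvMatches_ne_empty {m tl : String} (h : pvMatchesB m tl = true) : m.toList ≠ [] := by
  intro hm
  unfold pvMatchesB at h
  have h0 : PySem.Chars.split₀ m.toList = [] := by rw [hm]; rfl
  have : List.map String.toList (PySem.Str.split₀ m) = [] := by
    rw [PySem.Str.split₀_map_toList, h0]
  have h1 : PySem.Str.split₀ m = [] := List.map_eq_nil_iff.mp this
  rw [h1] at h
  simp at h

-- the marker loop: A's (found, terms) vs B's (hit, last)
theorem pvMarkerLoop (text : String) (hL : (pvLinesA text).length ≤ 100) :
    ∀ (cm : List String) (b : Bool) (terms : List (String × Int)) (last : Option String),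
      (∀ t ∈ terms, t.2 < 100) → pvFindInnerTermA terms = last → pvOk last →
      ((cm.foldl (fun (st : Bool × List (String × Int)) node_term =>
          let lvl := pvFindTermLevelA text (PySem.Str.split₀ node_term) (-1)
          if lvl ≠ -1 then (true, st.2 ++ [(node_term, lvl)]) else st) (b, terms)).1 =
        (cm.foldl (fun (p : Bool × Option String) m =>
          if pvMatchesB m (PySem.Str.lower text) then (true, some m) else p) (b, last)).1 ∧
       pvFindInnerTermA (cm.foldl (fun (st : Bool × List (String × Int)) node_term =>
          let lvl := pvFindTermLevelA text (PySem.Str.split₀ node_term) (-1)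
          if lvl ≠ -1 then (true, st.2 ++ [(node_term, lvl)]) else st) (b, terms)).2 =
        (cm.foldl (fun (p : Bool × Option String) m =>
          if pvMatchesB m (PySem.Str.lower text) then (true, some m) else p) (b, last)).2 ∧
       (∀ t ∈ (cm.foldl (fun (st : Bool × List (String × Int)) node_term =>
          let lvl := pvFindTermLevelA text (PySem.Str.split₀ node_term) (-1)
          if lvl ≠ -1 then (true, st.2 ++ [(node_term, lvl)]) else st) (b, terms)).2, t.2 < 100) ∧
       pvOk (cm.foldl (fun (p : Bool × Option String) m =>
          if pvMatchesB m (PySem.Str.lower text) then (true, some m) else p) (b, last)).2) := by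
  intro cm
  induction cm with
  | nil => intro b terms last h1 h2 h3; exact ⟨rfl, h2, h1, h3⟩
  | cons m rest ih =>
    intro b terms last h1 h2 h3
    simp only [List.foldl_cons]
    by_cases hm : pvMatchesB m (PySem.Str.lower text) = true
    · have hlvl : pvFindTermLevelA text (PySem.Str.split₀ m) (-1) ≠ -1 :=
        (pvFTL_iff m text).mpr hm
      have hlt : pvFindTermLevelA text (PySem.Str.split₀ m) (-1) < 100 :=
        pvFTL_lt hL _ _ (by omega)
      rw [if_pos hlvl, if_pos hm]
      refine ih true (terms ++ [(m, pvFindTermLevelA text (PySem.Str.split₀ m) (-1))]) (some m) ?_ ?_ ?_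
      · intro t ht
        rcases List.mem_append.mp ht with h | h
        · exact h1 t h
        · simp at h
          rw [h]
          exact hlt
      · rw [pvInner_append, if_pos hlt]
      · intro s hs
        cases hs
        exact pvMatches_ne_empty hm
    · have hlvl : ¬ (pvFindTermLevelA text (PySem.Str.split₀ m) (-1) ≠ -1) := by
        intro h; exact hm ((pvFTL_iff m text).mp h)
      rw [if_neg hlvl, if_neg hm]
      exact ih b terms last h1 h2 h3

theorem pvTruthy_iff {o : Option String} (hok : pvOk o) : (pvTruthyA o = true) ↔ o ≠ none := by
  cases o with
  | none => simp [pvTruthyA]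
  | some s =>
    simp only [pvTruthyA, Bool.not_eq_eq_eq_not, Bool.not_true, ne_eq, reduceCtorEq,
      not_false_eq_true, iff_true]
    rw [List.isEmpty_eq_false_iff]
    exact hok s rfl

-- A's node step agrees with B's, carrying the tracker invariant
theorem pvNodeAB (cm : List String) (text : String) (terms : List (String × Int))
    (last : Option String) (hL : (pvLinesA text).length ≤ 100)
    (h1 : ∀ t ∈ terms, t.2 < 100) (h2 : pvFindInnerTermA terms = last) (h3 : pvOk last) :
    (pvNodeA cm terms text).2 = (pvNodeB cm last text).2 ∧
    pvFindInnerTermA (pvNodeA cm terms text).1 = (pvNodeB cm last text).1 ∧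
    (∀ t ∈ (pvNodeA cm terms text).1, t.2 < 100) ∧
    pvOk (pvNodeB cm last text).1 ∧ pvOk (pvNodeB cm last text).2 := by
  obtain ⟨e1, e2, e3, e4⟩ := pvMarkerLoop text hL cm false terms last h1 h2 h3
  unfold pvNodeA pvNodeB
  simp only []
  refine ⟨?_, e2, e3, e4, ?_⟩
  · rw [e1, e2]
  · by_cases hf : (cm.foldl (fun (p : Bool × Option String) m =>
        if pvMatchesB m (PySem.Str.lower text) then (true, some m) else p) (false, last)).1
    · simpa [hf] using e4
    · simp only [hf, Bool.false_eq_true, if_false]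
      by_cases hh : PySem.Str.isIn "heart" (PySem.Str.lower text) = true
      · simp only [hh, if_true]
        intro s hs
        cases hs
        decide
      · simp only [hh, Bool.false_eq_true, if_false]
        intro s hs
        cases hs

-- literal-index helpers for two-element node lists
theorem pvSetD0 {α : Type} (x y v : α) : PySem.List.pySetD [x, y] 0 v = [v, y] := by
  rw [PySem.List.pySetD_of_nonneg [x, y] v (by norm_num)]; rfl

theorem pvSetD1 {α : Type} (x y v : α) : PySem.List.pySetD [x, y] 1 v = [x, v] := by
  rw [PySem.List.pySetD_of_nonneg [x, y] v (by norm_num)]; rfl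

theorem pvGetD1 {α : Type} (x y d : α) : PySem.List.pyGetD [x, y] 1 d = y := by
  rw [PySem.List.pyGetD_ofNat']; rfl

theorem pvGetD1' {α : Type} (x y : α) (r : List α) (d : α) :
    PySem.List.pyGetD (x :: y :: r) 1 d = y := by
  rw [PySem.List.pyGetD_ofNat']; rfl

theorem pvSliceTwo {α : Type} (t0 t1 : α) (rest : List α) :
    PySem.List.slice (t0 :: t1 :: rest) none (some 2) = [t0, t1] := by
  rw [PySem.List.slice_to _ (by norm_num)]; rfl

-- the element-append guard: A's truthiness test vs B's not-None test
theorem pvGuard (b0 b1 : Option String) (pes : List (List String))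
    (ht0 : pvTruthyA b0 = true ↔ b0 ≠ none) (ht1 : pvTruthyA b1 = true ↔ b1 ≠ none) :
    (if b0 ≠ b1 then
       if pvTruthyA b0 && pvTruthyA b1 then pes ++ [[b0.getD "", b1.getD ""]] else pes
     else pes) =
    (if b0 ≠ b1 ∧ b0 ≠ none ∧ b1 ≠ none then pes ++ [[b0.getD "", b1.getD ""]] else pes) := by
  by_cases hne : b0 = b1
  · rw [if_neg (by simpa using hne), if_neg (by simp [hne])]
  · rw [if_pos hne]
    by_cases h0 : b0 = none
    · have : pvTruthyA b0 = false := by rw [h0]; rfl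
      rw [if_neg (by simp [this]), if_neg (by simp [h0])]
    · by_cases h1 : b1 = none
      · have : pvTruthyA b1 = false := by rw [h1]; rfl
        rw [if_neg (by simp [this]), if_neg (by simp [h1])]
      · rw [if_pos (by simp [ht0.mpr h0, ht1.mpr h1]), if_pos ⟨hne, h0, h1⟩]

theorem pvGuardShape (b0 b1 : Option String) (pes : List (List String)) :
    (if b0 ≠ b1 then
       if pvTruthyA b0 && pvTruthyA b1 then pes ++ [[b0.getD "", b1.getD ""]] else pes
     else pes) = pes ∨
    ∃ x y, (if b0 ≠ b1 then
       if pvTruthyA b0 && pvTruthyA b1 then pes ++ [[b0.getD "", b1.getD ""]] else pes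
     else pes) = pes ++ [[x, y]] := by
  split_ifs
  · exact Or.inr ⟨_, _, rfl⟩
  · exact Or.inl rfl
  · exact Or.inl rfl

-- A's edge step agrees with B's
theorem pvEdgeAB (cm : List String) (t0 t1 : String) (rest : List String)
    (hL0 : (pvLinesA t0).length ≤ 100) (hL1 : (pvLinesA t1).length ≤ 100)
    (terms : List (String × Int)) (last : Option String) (pes : List (List String))
    (h1 : ∀ t ∈ terms, t.2 < 100) (h2 : pvFindInnerTermA terms = last) (h3 : pvOk last) :
    (pvEdgeA cm (terms, pes) (t0 :: t1 :: rest)).2 = (pvEdgeB cm (last, pes) (t0 :: t1 :: rest)).2 ∧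
    pvFindInnerTermA (pvEdgeA cm (terms, pes) (t0 :: t1 :: rest)).1 =
      (pvEdgeB cm (last, pes) (t0 :: t1 :: rest)).1 ∧
    (∀ t ∈ (pvEdgeA cm (terms, pes) (t0 :: t1 :: rest)).1, t.2 < 100) ∧
    pvOk (pvEdgeB cm (last, pes) (t0 :: t1 :: rest)).1 ∧
    ((pvEdgeA cm (terms, pes) (t0 :: t1 :: rest)).2 = pes ∨
      ∃ x y, (pvEdgeA cm (terms, pes) (t0 :: t1 :: rest)).2 = pes ++ [[x, y]]) := by
  obtain ⟨n1, n2, n3, n4, n5⟩ := pvNodeAB cm t0 terms last hL0 h1 h2 h3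
  obtain ⟨m1, m2, m3, m4, m5⟩ :=
    pvNodeAB cm t1 (pvNodeA cm terms t0).1 (pvNodeB cm last t0).1 hL1 n3 n2 n4
  unfold pvEdgeA pvEdgeB
  have hrange : PySem.List.pyRange 0 2 1 = [0, 1] := by decide
  rw [hrange, pvSliceTwo]
  simp only [List.foldl_cons, List.foldl_nil, PySem.List.pyGetD_zero_cons, pvGetD1',
    pvSetD0, pvSetD1, List.nil_append, List.singleton_append]
  rw [n1, m1]
  exact ⟨pvGuard _ _ pes (pvTruthy_iff n5) (pvTruthy_iff m5), m2, m3, m4,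
    pvGuardShape _ _ pes⟩

-- the full edge loop
theorem pvMainAB (cm : List String) :
    ∀ (el : List (List String)) (terms : List (String × Int)) (last : Option String)
      (pes : List (List String)),
      (∀ edge ∈ el, 2 ≤ edge.length ∧ ∀ t ∈ edge.take 2, (pvLinesA t).length ≤ 100) →
      (∀ t ∈ terms, t.2 < 100) → pvFindInnerTermA terms = last → pvOk last →
      (∀ c ∈ pes, ∃ x y, c = [x, y]) →
      (el.foldl (pvEdgeA cm) (terms, pes)).2 = (el.foldl (pvEdgeB cm) (last, pes)).2 ∧
      (∀ c ∈ (el.foldl (pvEdgeA cm) (terms, pes)).2, ∃ x y, c = [x, y]) := by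
  intro el
  induction el with
  | nil => intro terms last pes _ _ _ _ hshape; exact ⟨rfl, hshape⟩
  | cons edge el' ih =>
    intro terms last pes hpre h1 h2 h3 hshape
    obtain ⟨hlen, hlines⟩ := hpre edge List.mem_cons_self
    obtain ⟨t0, t1, rest, rfl⟩ : ∃ t0 t1 rest, edge = t0 :: t1 :: rest := by
      cases edge with
      | nil => simp at hlen
      | cons a tl =>
        cases tl with
        | nil => simp at hlen
        | cons b tl' => exact ⟨a, b, tl', rfl⟩
    have hL0 : (pvLinesA t0).length ≤ 100 := hlines t0 (by simp)
    have hL1 : (pvLinesA t1).length ≤ 100 := hlines t1 (by simp)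
    obtain ⟨e1, e2, e3, e4, e5⟩ := pvEdgeAB cm t0 t1 rest hL0 hL1 terms last pes h1 h2 h3
    simp only [List.foldl_cons]
    have hshape' : ∀ c ∈ (pvEdgeA cm (terms, pes) (t0 :: t1 :: rest)).2, ∃ x y, c = [x, y] := by
      rcases e5 with h | ⟨x, y, h⟩
      · rw [h]; exact hshape
      · rw [h]
        intro c hc
        rcases List.mem_append.mp hc with hc | hc
        · exact hshape c hc
        · simp at hc; exact ⟨x, y, hc⟩
    have hB : pvEdgeB cm (last, pes) (t0 :: t1 :: rest) =
        ((pvEdgeB cm (last, pes) (t0 :: t1 :: rest)).1,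
         (pvEdgeA cm (terms, pes) (t0 :: t1 :: rest)).2) := by
      rw [e1]
    rw [hB]
    have hA : pvEdgeA cm (terms, pes) (t0 :: t1 :: rest) =
        ((pvEdgeA cm (terms, pes) (t0 :: t1 :: rest)).1,
         (pvEdgeA cm (terms, pes) (t0 :: t1 :: rest)).2) := rfl
    rw [hA]
    exact ih _ _ _ (fun e he => hpre e (List.mem_cons_of_mem _ he)) e3 e2 e4 hshape'

-- the final set/sorted stage
theorem pvSetBuild :
    ∀ (pes : List (List String)) (s : PySem.Set String),
      (∀ c ∈ pes, ∃ x y, c = [x, y]) →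
      pes.foldl (fun s c =>
          PySem.Set.add (PySem.Set.add s (PySem.List.pyGetD c 0 "")) (PySem.List.pyGetD c 1 "")) s =
        PySem.Set.update s (pes.flatMap (fun e => e)) := by
  intro pes
  induction pes with
  | nil => intro s _; rw [List.foldl_nil, List.flatMap_nil, PySem.Set.update_nil]
  | cons c rest ih =>
    intro s hshape
    obtain ⟨x, y, rfl⟩ := hshape c List.mem_cons_self
    rw [List.foldl_cons, List.flatMap_cons, PySem.Set.update_append,
      ih _ (fun c hc => hshape c (List.mem_cons_of_mem _ hc))]
    rw [PySem.List.pyGetD_zero_cons, pvGetD1]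
    rw [PySem.Set.update_cons, PySem.Set.update_cons, PySem.Set.update_nil]

-- ===== VERDICT (by name: the statement is the Claim_ definition above) =====
theorem generate_path_scaffold_spec : Claim_equal_generate_path_scaffold := by
  intro cm el _hdom hpre
  unfold Spec_generate_path_scaffold
  simp only [generate_path_scaffold, generate_path_scaffold_alt]
  have hpre' : ∀ edge ∈ el, 2 ≤ edge.length ∧
      ∀ t ∈ edge.take 2, (pvLinesA t).length ≤ 100 := by
    intro e he
    obtain ⟨ha, hb⟩ := hpre e he
    exact ⟨ha, fun t ht => hb t ht⟩
  obtain ⟨hpes, hshape⟩ := pvMainAB cm el [] none [] hpre' (by simp) rfl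
    (fun s hs => by cases hs) (by simp)
  rw [hpes, pvSetBuild _ _ (by rw [hpes] at hshape; exact hshape), PySem.Set.update_empty]
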